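-- pv_equiv track=rewrite | github.com/pytorch/data | torchdata/dataloader2/random/_philox.py | philox_10_round
-- ===== SOURCE A (Python) =====
-- from typing import List, Optional, Tuple
--
-- kPhilox10A = 0x9E3779B9
--
-- kPhilox10B = 0xBB67AE85
--
-- kPhiloxSA = 0xD2511F53
--
-- kPhiloxSB = 0xCD9E8D57
--
-- MASK_32b = 0xFFFFFFFF
--
-- def mulhilo32(a: int, b: int) -> Tuple[int, int]:
--     product = a * b
--     return product & MASK_32b, (product >> 32) & MASK_32b
--
-- def single_round(key: List[int], ctr: List[int]) -> List[int]:
--     lo0, hi0 = mulhilo32(kPhiloxSA, ctr[0])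
--     lo1, hi1 = mulhilo32(kPhiloxSB, ctr[2])
--     res = [0] * 4
--     res[0] = hi1 ^ ctr[1] ^ key[0]
--     res[1] = lo1
--     res[2] = hi0 ^ ctr[3] ^ key[1]
--     res[3] = lo0
--     return res
--
-- def philox_10_round(key: Tuple[int, int], ctr: List[int]) -> List[int]:
--     _key = list(key)
--     _ctr = list(ctr)
--     for _ in range(9):
--         _ctr = single_round(_key, _ctr)
--         _key[0] = (_key[0] + kPhilox10A) & MASK_32b
--         _key[1] = (_key[1] + kPhilox10B) & MASK_32b
--     return single_round(_key, _ctr)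
-- ===== SOURCE B (Python) =====
-- from typing import List, Tuple
--
-- kPhilox10A = 0x9E3779B9
-- kPhilox10B = 0xBB67AE85
-- kPhiloxSA = 0xD2511F53
-- kPhiloxSB = 0xCD9E8D57
-- MASK_32b = 0xFFFFFFFF
--
--
-- def philox_10_round(key: Tuple[int, int], ctr: List[int]) -> List[int]:
--     # Uniform recursion on four scalar counter words and two scalar key words:
--     # no list state, no mulhilo/single_round helpers, no special-cased trailing
--     # round.  Each call performs one of the 10 rounds and recurses with the
--     # bumped keys; after round 9 the four words are returned.
--     def go(i: int, k0: int, k1: int, x0: int, x1: int, x2: int, x3: int) -> List[int]: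
--         p0 = kPhiloxSA * x0
--         p1 = kPhiloxSB * x2
--         y0 = ((p1 >> 32) & MASK_32b) ^ x1 ^ k0
--         y1 = p1 & MASK_32b
--         y2 = ((p0 >> 32) & MASK_32b) ^ x3 ^ k1
--         y3 = p0 & MASK_32b
--         if i == 9:
--             return [y0, y1, y2, y3]
--         return go(i + 1, (k0 + kPhilox10A) & MASK_32b, (k1 + kPhilox10B) & MASK_32b,
--                   y0, y1, y2, y3)
--
--     return go(0, key[0], key[1], ctr[0], ctr[1], ctr[2], ctr[3])
-- ===== Notes on version B (the rewrite author's own statement) =====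
-- stated objective: alternative
-- what changed: Replaces the list-state loop (9 iterations of a single_round/mulhilo32 helper pair plus a dangling tenth round and a mutable key list) by one uniform scalar recursion that threads the six words (two keys, four counter words) as parameters with the round arithmetic inlined and returns after round 9.
import Mathlib
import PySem

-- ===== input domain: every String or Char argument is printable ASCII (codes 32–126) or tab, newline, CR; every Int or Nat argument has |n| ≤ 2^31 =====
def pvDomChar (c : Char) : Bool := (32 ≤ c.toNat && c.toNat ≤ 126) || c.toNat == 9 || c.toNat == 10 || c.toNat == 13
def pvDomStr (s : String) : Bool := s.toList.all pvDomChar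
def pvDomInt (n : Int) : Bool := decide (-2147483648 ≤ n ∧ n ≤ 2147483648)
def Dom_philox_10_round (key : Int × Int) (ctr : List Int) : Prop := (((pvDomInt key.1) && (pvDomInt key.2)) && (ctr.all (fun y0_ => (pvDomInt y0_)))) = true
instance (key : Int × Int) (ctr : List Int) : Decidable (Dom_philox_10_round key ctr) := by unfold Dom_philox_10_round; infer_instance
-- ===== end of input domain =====

-- B replaces A's list-state loop with helpers and a special-cased trailing round by one
-- uniform scalar recursion threading the six words with the round arithmetic inlined
-- (objective: alternative decomposition, same cost).

-- ===== PORT A =====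
def kPhilox10A : Int := 0x9E3779B9
def kPhilox10B : Int := 0xBB67AE85
def kPhiloxSA : Int := 0xD2511F53
def kPhiloxSB : Int := 0xCD9E8D57
def MASK_32b : Int := 0xFFFFFFFF

def mulhilo32 (a b : Int) : Int × Int :=
  let product := a * b
  (PySem.Int.band product MASK_32b, PySem.Int.band (product >>> 32) MASK_32b)

-- ctr[i]/key[i]: Pre_ guarantees 4 ≤ ctr.length (Python raises IndexError otherwise);
-- pyGetD with default 0 stands in for the raising access outside Pre_.
def single_round (key : List Int) (ctr : List Int) : List Int :=
  let lohi0 := mulhilo32 kPhiloxSA (PySem.List.pyGetD ctr 0 0)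
  let lohi1 := mulhilo32 kPhiloxSB (PySem.List.pyGetD ctr 2 0)
  [PySem.Int.bxor (PySem.Int.bxor lohi1.2 (PySem.List.pyGetD ctr 1 0)) (PySem.List.pyGetD key 0 0),
   lohi1.1,
   PySem.Int.bxor (PySem.Int.bxor lohi0.2 (PySem.List.pyGetD ctr 3 0)) (PySem.List.pyGetD key 1 0),
   lohi0.1]

def philox_10_round (key : Int × Int) (ctr : List Int) : List Int :=
  let st := (List.range 9).foldl
    (fun (st : List Int × List Int) _ =>
      let c := single_round st.1 st.2
      ([PySem.Int.band (PySem.List.pyGetD st.1 0 0 + kPhilox10A) MASK_32b,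
        PySem.Int.band (PySem.List.pyGetD st.1 1 0 + kPhilox10B) MASK_32b], c))
    ([key.1, key.2], ctr)
  single_round st.1 st.2

-- ===== PORT B =====
-- Source B's `go` recursion; Python's round index i with the `if i == 9` exit is carried
-- here as the remaining-round count rem = 9 - i (rem = 0 ↔ i = 9).
def philoxGo : Nat → Int → Int → Int → Int → Int → Int → List Int
  | rem, k0, k1, x0, x1, x2, x3 =>
    let p0 := kPhiloxSA * x0
    let p1 := kPhiloxSB * x2
    let y0 := PySem.Int.bxor (PySem.Int.bxor (PySem.Int.band (p1 >>> 32) MASK_32b) x1) k0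
    let y1 := PySem.Int.band p1 MASK_32b
    let y2 := PySem.Int.bxor (PySem.Int.bxor (PySem.Int.band (p0 >>> 32) MASK_32b) x3) k1
    let y3 := PySem.Int.band p0 MASK_32b
    match rem with
    | 0 => [y0, y1, y2, y3]
    | rem' + 1 =>
        philoxGo rem' (PySem.Int.band (k0 + kPhilox10A) MASK_32b)
          (PySem.Int.band (k1 + kPhilox10B) MASK_32b) y0 y1 y2 y3

def philox_10_round_alt (key : Int × Int) (ctr : List Int) : List Int :=
  philoxGo 9 key.1 key.2 (PySem.List.pyGetD ctr 0 0) (PySem.List.pyGetD ctr 1 0)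
    (PySem.List.pyGetD ctr 2 0) (PySem.List.pyGetD ctr 3 0)

-- ===== PRECONDITION & SPEC =====
-- Python A raises IndexError when ctr has fewer than four elements.
def Pre_philox_10_round (key : Int × Int) (ctr : List Int) : Prop := 4 ≤ ctr.length
instance (key : Int × Int) (ctr : List Int) : Decidable (Pre_philox_10_round key ctr) := by unfold Pre_philox_10_round; infer_instance
def pvWitness_philox_10_round : (Int × Int) × List Int := ((1, 2), [3, 4, 5, 6])

def Spec_philox_10_round (key : Int × Int) (ctr : List Int) (out : List Int) : Prop := out = philox_10_round_alt key ctr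
instance (key : Int × Int) (ctr : List Int) (out : List Int) : Decidable (Spec_philox_10_round key ctr out) := by unfold Spec_philox_10_round; infer_instance

-- ===== CLAIM (what is proved, stated in full; the proofs are below) =====
def Claim_equal_philox_10_round : Prop := ∀ (key : Int × Int) (ctr : List Int), Dom_philox_10_round key ctr → Pre_philox_10_round key ctr → Spec_philox_10_round key ctr (philox_10_round key ctr)

-- ===== LEMMAS AND PROOFS =====

-- A's loop body as a named function of the state (the loop variable is unused).
def stepA (st : List Int × List Int) : List Int × List Int :=
  let c := single_round st.1 st.2
  ([PySem.Int.band (PySem.List.pyGetD st.1 0 0 + kPhilox10A) MASK_32b,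
    PySem.Int.band (PySem.List.pyGetD st.1 1 0 + kPhilox10B) MASK_32b], c)

theorem foldl_stepA (n : Nat) (s : List Int × List Int) :
    (List.range n).foldl (fun st (_ : Nat) => stepA st) s = stepA^[n] s := by
  induction n generalizing s with
  | zero => rfl
  | succ n ih =>
      rw [List.range_succ, List.foldl_append, ih, List.foldl_cons, List.foldl_nil,
        Function.iterate_succ_apply']

theorem single_round_cons (k0 k1 c0 c1 c2 c3 : Int) (rest : List Int) :
    single_round [k0, k1] (c0 :: c1 :: c2 :: c3 :: rest) =
      [PySem.Int.bxor (PySem.Int.bxor (PySem.Int.band ((kPhiloxSB * c2) >>> 32) MASK_32b) c1) k0,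
       PySem.Int.band (kPhiloxSB * c2) MASK_32b,
       PySem.Int.bxor (PySem.Int.bxor (PySem.Int.band ((kPhiloxSA * c0) >>> 32) MASK_32b) c3) k1,
       PySem.Int.band (kPhiloxSA * c0) MASK_32b] := by
  simp [single_round, mulhilo32, PySem.List.pyGetD_ofNat']

theorem philoxGo_zero (k0 k1 x0 x1 x2 x3 : Int) :
    philoxGo 0 k0 k1 x0 x1 x2 x3 =
      [PySem.Int.bxor (PySem.Int.bxor (PySem.Int.band ((kPhiloxSB * x2) >>> 32) MASK_32b) x1) k0,
       PySem.Int.band (kPhiloxSB * x2) MASK_32b,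
       PySem.Int.bxor (PySem.Int.bxor (PySem.Int.band ((kPhiloxSA * x0) >>> 32) MASK_32b) x3) k1,
       PySem.Int.band (kPhiloxSA * x0) MASK_32b] := rfl

theorem philoxGo_succ (n : Nat) (k0 k1 x0 x1 x2 x3 : Int) :
    philoxGo (n + 1) k0 k1 x0 x1 x2 x3 =
      philoxGo n (PySem.Int.band (k0 + kPhilox10A) MASK_32b)
        (PySem.Int.band (k1 + kPhilox10B) MASK_32b)
        (PySem.Int.bxor (PySem.Int.bxor (PySem.Int.band ((kPhiloxSB * x2) >>> 32) MASK_32b) x1) k0)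
        (PySem.Int.band (kPhiloxSB * x2) MASK_32b)
        (PySem.Int.bxor (PySem.Int.bxor (PySem.Int.band ((kPhiloxSA * x0) >>> 32) MASK_32b) x3) k1)
        (PySem.Int.band (kPhiloxSA * x0) MASK_32b) := rfl

theorem iterate_stepA_go (n : Nat) (k0 k1 c0 c1 c2 c3 : Int) (rest : List Int) :
    single_round (stepA^[n] ([k0, k1], c0 :: c1 :: c2 :: c3 :: rest)).1
        (stepA^[n] ([k0, k1], c0 :: c1 :: c2 :: c3 :: rest)).2 =
      philoxGo n k0 k1 c0 c1 c2 c3 := by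
  induction n generalizing k0 k1 c0 c1 c2 c3 rest with
  | zero =>
      rw [Function.iterate_zero_apply, philoxGo_zero, single_round_cons]
  | succ n ih =>
      rw [Function.iterate_succ_apply, philoxGo_succ]
      have hstep : stepA ([k0, k1], c0 :: c1 :: c2 :: c3 :: rest) =
          ([PySem.Int.band (k0 + kPhilox10A) MASK_32b,
            PySem.Int.band (k1 + kPhilox10B) MASK_32b],
           [PySem.Int.bxor (PySem.Int.bxor (PySem.Int.band ((kPhiloxSB * c2) >>> 32) MASK_32b) c1) k0,
            PySem.Int.band (kPhiloxSB * c2) MASK_32b,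
            PySem.Int.bxor (PySem.Int.bxor (PySem.Int.band ((kPhiloxSA * c0) >>> 32) MASK_32b) c3) k1,
            PySem.Int.band (kPhiloxSA * c0) MASK_32b]) := by
        simp [stepA, single_round_cons, PySem.List.pyGetD_ofNat']
      rw [hstep, ih _ _ _ _ _ _ []]

-- ===== VERDICT (by name: the statement is the Claim_ definition above) =====
theorem philox_10_round_spec : Claim_equal_philox_10_round := by
  intro key ctr hd hp
  obtain ⟨c0, c1, c2, c3, rest, rfl⟩ :
      ∃ c0 c1 c2 c3 rest, ctr = c0 :: c1 :: c2 :: c3 :: rest := by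
    match ctr, hp with
    | c0 :: c1 :: c2 :: c3 :: rest, _ => exact ⟨c0, c1, c2, c3, rest, rfl⟩
  show philox_10_round key _ = philox_10_round_alt key _
  unfold philox_10_round philox_10_round_alt
  rw [show (fun (st : List Int × List Int) (_ : Nat) =>
        ([PySem.Int.band (PySem.List.pyGetD st.1 0 0 + kPhilox10A) MASK_32b,
          PySem.Int.band (PySem.List.pyGetD st.1 1 0 + kPhilox10B) MASK_32b],
         single_round st.1 st.2)) = (fun st (_ : Nat) => stepA st) from rfl,
    foldl_stepA, iterate_stepA_go]
  simp [PySem.List.pyGetD_ofNat']
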